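-- pv_equiv track=rewrite | github.com/efoncubierta/advent-of-code | 2024/day07/main.py | solve
-- ===== SOURCE A (Python) =====
-- def solve(elems, total, part2 = False):
--     if elems[0] > total:
--         return None
--
--     if len(elems) == 1:
--         return elems[0] if elems[0] == total else None
--
--     e1 = elems.pop(0)
--     e2 = elems.pop(0)
--
--     r = solve([e1 + e2] + elems, total, part2)
--     if r == total:
--         return r
--
--     r = solve([e1 * e2] + elems, total, part2)
--     if r == total:
--         return r
--
--     return solve([int("{}{}".format(e1,e2))] + elems, total, part2) if part2 else r
-- ===== SOURCE B (Python) =====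
-- def solve(elems, total, part2=False):
--     # Forward reachable-set DP: one pass over the list, keeping the deduplicated
--     # set of values (<= total) reachable on a prefix; no backtracking.
--     # Concatenation only applies to a nonnegative right operand
--     # (int(str(v) + str(y)) is ill-formed when y < 0).
--     states = {elems[0]} if elems[0] <= total else set()
--     for y in elems[1:]:
--         nxt = set()
--         for v in states:
--             cands = (v + y, v * y, int(str(v) + str(y))) if part2 and y >= 0 else (v + y, v * y)
--             for c in cands:
--                 if c <= total:
--                     nxt.add(c)
--         states = nxt
--     return total if total in states else None
-- ===== Notes on version B (the rewrite author's own statement) =====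
-- stated objective: alternative
-- what changed: Replaces A's 3-way branching recursion with head rebuilds by a single left-to-right pass maintaining the deduplicated set of reachable prefix values (bounded by total, concatenation only for nonnegative right operands), then a final membership test.
-- outside the precondition, e.g. on solve([1, -1, 5], 5, True): A returns 5, B returns 5; on solve([2, -3], 100, True): A raises ValueError, B returns None
import Mathlib
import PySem

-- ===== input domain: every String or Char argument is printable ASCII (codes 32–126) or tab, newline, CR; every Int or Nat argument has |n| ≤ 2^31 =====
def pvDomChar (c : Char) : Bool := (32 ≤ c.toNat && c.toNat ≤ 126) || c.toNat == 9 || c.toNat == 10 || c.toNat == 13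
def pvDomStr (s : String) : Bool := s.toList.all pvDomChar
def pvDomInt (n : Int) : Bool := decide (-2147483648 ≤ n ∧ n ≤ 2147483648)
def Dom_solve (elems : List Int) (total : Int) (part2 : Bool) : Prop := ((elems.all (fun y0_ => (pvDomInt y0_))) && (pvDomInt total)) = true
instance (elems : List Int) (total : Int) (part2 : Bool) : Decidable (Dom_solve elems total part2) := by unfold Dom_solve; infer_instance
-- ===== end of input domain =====

-- B replaces A's 3-way branching recursion by a single pass keeping the deduplicated
-- set of reachable prefix values (alternative decomposition, not claimed faster).
-- Note: Python A pops two elements from the caller's list (observable mutation);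
-- Python B does not mutate; the equivalence proved here is about the RETURN value only.

-- shared primitive: int("{}{}".format(e1,e2)) / int(str(v)+str(y)); Python raises
-- ValueError when the second operand is negative — inputs on which A evaluates such a
-- concatenation are outside Pre_solve, so the .getD 0 default is never reached there.
def concatIO (a b : Int) : Int :=
  (PySem.Int.ofStr? (PySem.Int.toStr a ++ PySem.Int.toStr b)).getD 0

-- ===== PORT A =====
def solve (elems : List Int) (total : Int) (part2 : Bool) : Option Int :=
  match elems with
  | [] => none  -- Python: elems[0] raises IndexError (excluded by Pre_solve)
  | [x] => if x > total then none else if x = total then some x else none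
  | x :: y :: rest =>
    if x > total then none
    else
      let r1 := solve ((x + y) :: rest) total part2
      if r1 = some total then r1
      else
        let r2 := solve ((x * y) :: rest) total part2
        if r2 = some total then r2
        else if part2 then solve (concatIO x y :: rest) total part2 else r2
termination_by elems.length
decreasing_by all_goals simp

-- ===== PORT B =====
-- B-side helpers: the candidate tuple, the filtered set-insertion, and one step of the pass
def candB (part2 : Bool) (y v : Int) : List Int :=
  if part2 && decide (0 ≤ y) then [v + y, v * y, concatIO v y] else [v + y, v * y]

def addB (total : Int) (a : List Int) (c : Int) : List Int :=
  if c ≤ total then PySem.Set.add a c else a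

def stepB (total : Int) (part2 : Bool) (states : List Int) (y : Int) : List Int :=
  states.foldl (fun acc v => (candB part2 y v).foldl (addB total) acc) []

def solve_alt (elems : List Int) (total : Int) (part2 : Bool) : Option Int :=
  match elems with
  | [] => none  -- Python: elems[0] raises IndexError (excluded by Pre_solve)
  | x :: rest =>
    let init : List Int := if x ≤ total then [x] else []
    let states := rest.foldl (stepB total part2) init
    if total ∈ states then some total else none

-- ===== PRECONDITION & SPEC =====
-- Pre_ excludes the empty list, on which Python A raises IndexError, and (for part2)
-- lists whose tail contains a negative element unless the head already exceeds total
-- (immediate None): on such inputs Python A raises ValueError at int() of a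
-- concatenation whenever its search reaches the negative element; the exclusion is a
-- closed-form over-approximation of that search-dependent raise set (A returns a value
-- on some excluded inputs, and B returns the same value there).
def Pre_solve (elems : List Int) (total : Int) (part2 : Bool) : Prop :=
  elems ≠ [] ∧ (part2 = true → (∀ e ∈ elems.tail, 0 ≤ e) ∨ total < elems.headI)
instance (elems : List Int) (total : Int) (part2 : Bool) : Decidable (Pre_solve elems total part2) := by unfold Pre_solve; infer_instance

def pvWitness_solve : List Int × Int × Bool := ([81, 40, 27], 3267, true)

def Spec_solve (elems : List Int) (total : Int) (part2 : Bool) (out : Option Int) : Prop := out = solve_alt elems total part2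
instance (elems : List Int) (total : Int) (part2 : Bool) (out : Option Int) : Decidable (Spec_solve elems total part2 out) := by unfold Spec_solve; infer_instance

-- ===== CLAIM (what is proved, stated in full; the proofs are below) =====
def Claim_equal_solve : Prop := ∀ (elems : List Int) (total : Int) (part2 : Bool), Dom_solve elems total part2 → Pre_solve elems total part2 → Spec_solve elems total part2 (solve elems total part2)

-- ===== LEMMAS AND PROOFS =====

theorem mem_foldl_addB (total : Int) (L : List Int) (acc : List Int) (z : Int) :
    z ∈ L.foldl (addB total) acc ↔ z ∈ acc ∨ (z ∈ L ∧ z ≤ total) := by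
  induction L generalizing acc with
  | nil => simp
  | cons c L ih =>
    simp only [List.foldl_cons, ih, addB]
    split_ifs with h
    · simp only [PySem.Set.mem_add, List.mem_cons]
      constructor
      · rintro ((hz | rfl) | h2)
        · exact Or.inl hz
        · exact Or.inr ⟨Or.inl rfl, h⟩
        · exact Or.inr ⟨Or.inr h2.1, h2.2⟩
      · rintro (hz | ⟨(rfl | hz), hle⟩)
        · exact Or.inl (Or.inl hz)
        · exact Or.inl (Or.inr rfl)
        · exact Or.inr ⟨hz, hle⟩
    · simp only [List.mem_cons]
      constructor
      · rintro (hz | h2)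
        · exact Or.inl hz
        · exact Or.inr ⟨Or.inr h2.1, h2.2⟩
      · rintro (hz | ⟨(rfl | hz), hle⟩)
        · exact Or.inl hz
        · exact absurd hle h
        · exact Or.inr ⟨hz, hle⟩

theorem mem_stepB (total : Int) (part2 : Bool) (S : List Int) (y z : Int) :
    z ∈ stepB total part2 S y ↔ ∃ v ∈ S, z ∈ candB part2 y v ∧ z ≤ total := by
  have key : ∀ (S acc : List Int),
      z ∈ S.foldl (fun acc v => (candB part2 y v).foldl (addB total) acc) acc ↔
        z ∈ acc ∨ ∃ v ∈ S, z ∈ candB part2 y v ∧ z ≤ total := by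
    intro S
    induction S with
    | nil => simp
    | cons v S ih =>
      intro acc
      simp only [List.foldl_cons, ih, mem_foldl_addB, List.mem_cons]
      constructor
      · rintro ((hz | h1) | ⟨w, hw, hc⟩)
        · exact Or.inl hz
        · exact Or.inr ⟨v, Or.inl rfl, h1⟩
        · exact Or.inr ⟨w, Or.inr hw, hc⟩
      · rintro (hz | ⟨w, (rfl | hw), hc⟩)
        · exact Or.inl (Or.inl hz)
        · exact Or.inl (Or.inr hc)
        · exact Or.inr ⟨w, hw, hc⟩
  simpa using key S []

theorem stepB_nil (total : Int) (part2 : Bool) (y : Int) : stepB total part2 [] y = [] := rfl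

theorem foldl_stepB_nil (total : Int) (part2 : Bool) (rest : List Int) :
    rest.foldl (stepB total part2) [] = [] := by
  induction rest with
  | nil => rfl
  | cons y rest ih => simpa [stepB_nil] using ih

theorem mem_foldl_stepB (total : Int) (part2 : Bool) (rest : List Int) (S : List Int) (z : Int) :
    z ∈ rest.foldl (stepB total part2) S ↔
      ∃ v ∈ S, z ∈ rest.foldl (stepB total part2) [v] := by
  induction rest generalizing S with
  | nil => simp
  | cons y rest ih =>
    simp only [List.foldl_cons]
    rw [ih]
    constructor
    · rintro ⟨w, hw, hz⟩
      rw [mem_stepB] at hw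
      obtain ⟨v, hv, hc⟩ := hw
      refine ⟨v, hv, ?_⟩
      rw [ih]
      refine ⟨w, ?_, hz⟩
      rw [mem_stepB]
      exact ⟨v, List.mem_singleton_self v, hc⟩
    · rintro ⟨v, hv, hz⟩
      rw [ih] at hz
      obtain ⟨w, hw, hz⟩ := hz
      rw [mem_stepB] at hw
      obtain ⟨u, hu, hc⟩ := hw
      rw [List.mem_singleton] at hu
      subst hu
      refine ⟨w, ?_, hz⟩
      rw [mem_stepB]
      exact ⟨u, hv, hc⟩

theorem solve_one (total : Int) (part2 : Bool) (x : Int) :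
    solve [x] total part2 = if x > total then none else if x = total then some x else none := by
  rw [solve]

theorem solve_cons_cons (total : Int) (part2 : Bool) (x y : Int) (rest : List Int) :
    solve (x :: y :: rest) total part2 =
      if x > total then none
      else if solve ((x + y) :: rest) total part2 = some total then some total
      else if solve ((x * y) :: rest) total part2 = some total then some total
      else if part2 then solve (concatIO x y :: rest) total part2
      else solve ((x * y) :: rest) total part2 := by
  rw [solve]
  dsimp only
  split_ifs with h1 h2 h3 <;> simp_all

theorem mem_candB (part2 : Bool) (y v z : Int) (hy : part2 = true → 0 ≤ y) :
    z ∈ candB part2 y v ↔ z = v + y ∨ z = v * y ∨ (part2 = true ∧ z = concatIO v y) := by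
  cases part2 with
  | false => simp [candB]
  | true => simp [candB, hy rfl]

theorem solve_some_or_none (total : Int) (part2 : Bool) (rest : List Int) (x : Int) :
    solve (x :: rest) total part2 = some total ∨ solve (x :: rest) total part2 = none := by
  induction rest generalizing x with
  | nil =>
    rw [solve_one]
    split_ifs with h1 h2
    · exact Or.inr rfl
    · exact Or.inl (by rw [h2])
    · exact Or.inr rfl
  | cons y rest ih =>
    rw [solve_cons_cons]
    split_ifs with h1 h2 h3 h4
    · exact Or.inr rfl
    · exact Or.inl rfl
    · exact Or.inl rfl
    · exact ih _
    · rcases ih (x * y) with h | h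
      · exact absurd h h3
      · exact Or.inr h

theorem solve_eq_some_iff (total : Int) (part2 : Bool) (rest : List Int) (x : Int)
    (hrest : part2 = true → ∀ e ∈ rest, 0 ≤ e) :
    solve (x :: rest) total part2 = some total ↔
      x ≤ total ∧ total ∈ rest.foldl (stepB total part2) [x] := by
  induction rest generalizing x with
  | nil =>
    rw [solve_one]
    simp only [List.foldl_nil, List.mem_singleton]
    split_ifs with h1 h2
    · constructor
      · intro h; exact absurd h (by simp)
      · rintro ⟨hx, rfl⟩; omega
    · subst h2; simp
    · constructor
      · intro h; exact absurd h (by simp)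
      · rintro ⟨hx, rfl⟩; exact absurd rfl h2
  | cons y rest ih =>
    have hy : part2 = true → 0 ≤ y := fun hp => hrest hp y (by simp)
    have hrest' : part2 = true → ∀ e ∈ rest, 0 ≤ e :=
      fun hp e he => hrest hp e (List.mem_cons_of_mem y he)
    have rhs : (x ≤ total ∧ total ∈ (y :: rest).foldl (stepB total part2) [x]) ↔
        x ≤ total ∧ ((x + y ≤ total ∧ total ∈ rest.foldl (stepB total part2) [x + y]) ∨
          (x * y ≤ total ∧ total ∈ rest.foldl (stepB total part2) [x * y]) ∨
          (part2 = true ∧ concatIO x y ≤ total ∧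
            total ∈ rest.foldl (stepB total part2) [concatIO x y])) := by
      simp only [List.foldl_cons]
      rw [mem_foldl_stepB]
      constructor
      · rintro ⟨hx, w, hw, hz⟩
        rw [mem_stepB] at hw
        obtain ⟨v, hv, hc, hle⟩ := hw
        rw [List.mem_singleton] at hv; subst hv
        rw [mem_candB _ _ _ _ hy] at hc
        refine ⟨hx, ?_⟩
        rcases hc with rfl | rfl | ⟨hp, rfl⟩
        · exact Or.inl ⟨hle, hz⟩
        · exact Or.inr (Or.inl ⟨hle, hz⟩)
        · exact Or.inr (Or.inr ⟨hp, hle, hz⟩)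
      · rintro ⟨hx, h⟩
        refine ⟨hx, ?_⟩
        rcases h with ⟨hle, hz⟩ | ⟨hle, hz⟩ | ⟨hp, hle, hz⟩
        · exact ⟨x + y, by rw [mem_stepB]; exact ⟨x, List.mem_singleton_self x, by rw [mem_candB _ _ _ _ hy]; exact Or.inl rfl, hle⟩, hz⟩
        · exact ⟨x * y, by rw [mem_stepB]; exact ⟨x, List.mem_singleton_self x, by rw [mem_candB _ _ _ _ hy]; exact Or.inr (Or.inl rfl), hle⟩, hz⟩
        · exact ⟨concatIO x y, by rw [mem_stepB]; exact ⟨x, List.mem_singleton_self x, by rw [mem_candB _ _ _ _ hy]; exact Or.inr (Or.inr ⟨hp, rfl⟩), hle⟩, hz⟩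
    rw [rhs, solve_cons_cons]
    split_ifs with h1 h2 h3 h4
    · constructor
      · intro h; exact absurd h (by simp)
      · rintro ⟨hx, _⟩; omega
    · rw [ih _ hrest'] at h2
      constructor
      · intro _; exact ⟨by omega, Or.inl h2⟩
      · intro _; rfl
    · rw [ih _ hrest'] at h3
      constructor
      · intro _; exact ⟨by omega, Or.inr (Or.inl h3)⟩
      · intro _; rfl
    · rw [ih _ hrest']
      rw [ih _ hrest'] at h2 h3
      constructor
      · intro h; exact ⟨by omega, Or.inr (Or.inr ⟨h4, h⟩)⟩
      · rintro ⟨hx, h | h | ⟨_, h⟩⟩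
        · exact absurd h h2
        · exact absurd h h3
        · exact h
    · rw [ih _ hrest'] at h2 h3
      rcases solve_some_or_none total part2 rest (x * y) with h | h
      · exact absurd (ih (x * y) hrest' |>.mp h) h3
      · rw [h]
        constructor
        · intro hc; exact absurd hc (by simp)
        · rintro ⟨hx, hcase | hcase | ⟨hp, _⟩⟩
          · exact absurd hcase h2
          · exact absurd hcase h3
          · exact absurd hp h4

theorem solve_alt_cons (total : Int) (part2 : Bool) (x : Int) (rest : List Int) :
    solve_alt (x :: rest) total part2 =
      if total ∈ rest.foldl (stepB total part2) (if x ≤ total then [x] else []) then some total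
      else none := rfl

theorem solve_eq_solve_alt_of_tail_nonneg (total : Int) (part2 : Bool) (x : Int)
    (rest : List Int) (hrest : part2 = true → ∀ e ∈ rest, 0 ≤ e) :
    solve (x :: rest) total part2 = solve_alt (x :: rest) total part2 := by
  rw [solve_alt_cons]
  by_cases hx : x ≤ total
  · rw [if_pos hx]
    by_cases hm : total ∈ rest.foldl (stepB total part2) [x]
    · rw [if_pos hm, (solve_eq_some_iff total part2 rest x hrest).2 ⟨hx, hm⟩]
    · rw [if_neg hm]
      rcases solve_some_or_none total part2 rest x with h | h
      · exact absurd ((solve_eq_some_iff total part2 rest x hrest).1 h).2 hm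
      · exact h
  · rw [if_neg hx, foldl_stepB_nil]
    have hne : solve (x :: rest) total part2 = none := by
      rcases solve_some_or_none total part2 rest x with h | h
      · exact absurd ((solve_eq_some_iff total part2 rest x hrest).1 h).1 hx
      · exact h
    simpa using hne

theorem solve_head_gt_total (total : Int) (part2 : Bool) (x : Int) (rest : List Int)
    (hx : total < x) : solve (x :: rest) total part2 = none := by
  cases rest with
  | nil => rw [solve_one, if_pos (by omega)]
  | cons y rest => rw [solve_cons_cons, if_pos (by omega)]

-- ===== VERDICT (by name: the statement is the Claim_ definition above) =====
theorem solve_spec : Claim_equal_solve := by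
  intro elems total part2 _ hpre
  unfold Spec_solve
  obtain ⟨hne, hpre2⟩ := hpre
  match elems with
  | [] => exact absurd rfl hne
  | x :: rest =>
    cases part2 with
    | false => exact solve_eq_solve_alt_of_tail_nonneg total false x rest (by simp)
    | true =>
      rcases hpre2 rfl with hnn | hlt
      · exact solve_eq_solve_alt_of_tail_nonneg total true x rest (fun _ => by simpa using hnn)
      · simp only [List.headI] at hlt
        rw [solve_head_gt_total total true x rest hlt]
        simp [solve_alt_cons, foldl_stepB_nil, show ¬ x ≤ total from by omega]
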